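-- pv_equiv track=rewrite | github.com/gasparyanartur/simulation-of-complex-systems-solutions | homework-1/ex-1_1/main.py | decode_rule
-- ===== SOURCE A (Python) =====
-- def decode_rule(rule_number: int) -> dict[tuple[int, int, int], int]:
--     binary_numbers = [
--         (1, 1, 1), (1, 1, 0), (1, 0, 1), (1, 0, 0),
--         (0, 1, 1), (0, 1, 0), (0, 0, 1), (0, 0, 0)
--     ]
--
--     rule = dict()
--     num = rule_number
--     for i in range(8):
--         num, rem = divmod(num, 2)
--         rule[binary_numbers[-i-1]] = rem
--
--     return rule
-- ===== SOURCE B (Python) =====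
-- from itertools import product
--
--
-- def decode_rule(rule_number: int) -> dict[tuple[int, int, int], int]:
--     # Reduce to the 8-bit rule once, render it as a binary string, and pair
--     # its reversed digits with the neighborhoods in ascending numeric order.
--     bits = format(rule_number % 256, '08b')[::-1]
--     return {key: int(bit) for key, bit in zip(product((0, 1), repeat=3), bits)}
-- ===== Notes on version B (the rewrite author's own statement) =====
-- stated objective: idiomatic
-- what changed: B performs one modular reduction to the low eight bits, renders them as a zero-padded binary string via format(), and zips the reversed digit string with the neighborhoods in ascending numeric order -- no running divmod accumulator, no reverse-indexed key list, no per-key arithmetic.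
import Mathlib
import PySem

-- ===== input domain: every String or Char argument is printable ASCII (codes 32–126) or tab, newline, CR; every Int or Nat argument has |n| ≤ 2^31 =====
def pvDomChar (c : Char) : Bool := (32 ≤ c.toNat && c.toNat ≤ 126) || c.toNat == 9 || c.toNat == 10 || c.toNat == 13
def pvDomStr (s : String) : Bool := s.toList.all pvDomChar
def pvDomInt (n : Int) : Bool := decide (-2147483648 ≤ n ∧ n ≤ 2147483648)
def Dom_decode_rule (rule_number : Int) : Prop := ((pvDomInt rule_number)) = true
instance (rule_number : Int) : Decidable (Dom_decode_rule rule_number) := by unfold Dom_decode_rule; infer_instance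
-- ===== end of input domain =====

-- B replaces A's 8-step divmod accumulator with one modular reduction to the 8-bit rule,
-- a binary-string rendering of it, and a zip of the reversed digits with the ascending
-- neighborhood list (idiomatic rewrite, same cost).

-- ===== PORT A =====
def decode_rule (rule_number : Int) : List (Int × Int × Int × Int) :=
  let binary_numbers : List (Int × Int × Int) :=
    [(1,1,1), (1,1,0), (1,0,1), (1,0,0), (0,1,1), (0,1,0), (0,0,1), (0,0,0)]
  let st := (PySem.List.pyRange 0 8 1).foldl
    (fun (st : Int × PySem.Dict (Int × Int × Int) Int) i =>
      let num := st.1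
      let rule := st.2
      let rem := PySem.Int.mod num 2
      let num' := PySem.Int.floordiv num 2
      -- binary_numbers[-i-1]: always in range for i ∈ range(8)
      let key := (PySem.List.pyGet? binary_numbers (-i-1)).getD (0,0,0)
      (num', rule.insert key rem))
    (rule_number, PySem.Dict.empty)
  st.2.items.map (fun kv => (kv.1.1, kv.1.2.1, kv.1.2.2, kv.2))

-- ===== PORT B =====
def decode_rule_alt (rule_number : Int) : List (Int × Int × Int × Int) :=
  let m := PySem.Int.mod rule_number 256
  -- format(m, '08b'): binary digits of m (here m ∈ [0, 256)), zero-padded on the left to width 8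
  let digits := Nat.toDigits 2 m.toNat
  let bits := (List.replicate (8 - digits.length) '0' ++ digits).reverse   -- [::-1]
  let keys : List (Int × Int × Int) :=                                     -- product((0,1), repeat=3)
    ([0, 1] : List Int).flatMap (fun a =>
      ([0, 1] : List Int).flatMap (fun b =>
        ([0, 1] : List Int).map (fun c => (a, b, c))))
  -- int(bit) on a digit char is exactly its code minus 48
  (keys.zip bits).map (fun kb => (kb.1.1, kb.1.2.1, kb.1.2.2, ((kb.2.toNat : Int) - 48)))

-- ===== PRECONDITION & SPEC =====
def Spec_decode_rule (rule_number : Int) (out : List (Int × Int × Int × Int)) : Prop := out = decode_rule_alt rule_number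
instance (rule_number : Int) (out : List (Int × Int × Int × Int)) : Decidable (Spec_decode_rule rule_number out) := by unfold Spec_decode_rule; infer_instance

-- ===== CLAIM (what is proved, stated in full; the proofs are below) =====
def Claim_equal_decode_rule : Prop := ∀ (rule_number : Int), Dom_decode_rule rule_number → Spec_decode_rule rule_number (decode_rule rule_number)

-- ===== LEMMAS AND PROOFS =====

-- A reads rule_number only through its low 8 bits.
theorem decode_rule_mod256 (n : Int) : decode_rule n = decode_rule (PySem.Int.mod n 256) := by
  unfold decode_rule
  simp [show (PySem.List.pyRange 0 8 1) = [0, 1, 2, 3, 4, 5, 6, 7] from by decide,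
        PySem.List.pyGet?, PySem.List.pyIdx?, PySem.Dict.insert, PySem.Dict.empty,
        PySem.Dict.contains]
  omega

-- B reads rule_number only through rule_number % 256, and % 256 is idempotent.
theorem decode_rule_alt_mod256 (n : Int) :
    decode_rule_alt n = decode_rule_alt (PySem.Int.mod n 256) := by
  unfold decode_rule_alt
  have h : PySem.Int.mod (PySem.Int.mod n 256) 256 = PySem.Int.mod n 256 := by
    simp [PySem.Int.mod]
  rw [h]

-- The two ports agree on every 8-bit residue.
set_option maxRecDepth 8192 in
theorem decode_rule_eq_alt_fin : ∀ k : Fin 256, decode_rule (k : Int) = decode_rule_alt (k : Int) := by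
  decide

-- ===== VERDICT (by name: the statement is the Claim_ definition above) =====
theorem decode_rule_spec : Claim_equal_decode_rule := by
  intro n _
  unfold Spec_decode_rule
  have h0 : (0:Int) < 256 := by norm_num
  have hlo := PySem.Int.mod_nonneg n h0
  have hhi := PySem.Int.mod_lt n h0
  have hk : ((⟨(PySem.Int.mod n 256).toNat, by omega⟩ : Fin 256) : Int) = PySem.Int.mod n 256 := by
    simp; omega
  rw [decode_rule_mod256 n, decode_rule_alt_mod256 n, ← hk,
      decode_rule_eq_alt_fin]
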